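-- pv_equiv track=rewrite | github.com/wanghongye200211/scLineagePred | classification/plot_140802.py | sanitize_key
-- ===== SOURCE A (Python) =====
-- def sanitize_key(s: str) -> str:
--     out = []
--     for ch in s:
--         if ch.isalnum():
--             out.append(ch)
--         else:
--             out.append("_")
--     s2 = "".join(out).strip("_")
--     while "__" in s2:
--         s2 = s2.replace("__", "_")
--     return s2
-- ===== SOURCE B (Python) =====
-- def sanitize_key(s: str) -> str:
--     out = []
--     prev_underscore = True  # suppress leading underscores
--     for ch in s:
--         if ch.isalnum():
--             out.append(ch)
--             prev_underscore = False
--         elif not prev_underscore: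
--             out.append("_")
--             prev_underscore = True
--     return "".join(out).strip("_")
-- ===== Notes on version B (the rewrite author's own statement) =====
-- stated objective: simpler
-- what changed: Replaced A's three phases (map every char, strip the ends, then a while loop of repeated double-underscore replace scans) by a single pass over s with a prev-underscore flag that emits at most one separator per run and suppresses a leading run, followed by one final strip.
import Mathlib
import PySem

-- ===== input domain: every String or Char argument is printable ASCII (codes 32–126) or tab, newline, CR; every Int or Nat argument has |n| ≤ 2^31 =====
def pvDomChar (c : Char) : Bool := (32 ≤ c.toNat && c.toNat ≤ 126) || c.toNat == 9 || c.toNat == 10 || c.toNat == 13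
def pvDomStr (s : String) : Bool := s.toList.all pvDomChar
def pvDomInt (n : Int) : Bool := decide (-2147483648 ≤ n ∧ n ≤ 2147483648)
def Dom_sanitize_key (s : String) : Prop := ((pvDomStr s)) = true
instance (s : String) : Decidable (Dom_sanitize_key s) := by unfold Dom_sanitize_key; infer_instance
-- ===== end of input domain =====

-- B replaces A's map + strip + repeated replace('__','_') scans by one pass with a
-- prev-underscore flag followed by a single strip('_'); objective: simpler.

-- ===== PORT A =====

-- `s2.replace("__", "_")` written as one left-to-right pass (used only to prove
-- termination of the while loop below; `replace_eq_skRep` shows it IS Chars.replace).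
def skRep : List Char → List Char
  | [] => []
  | [c] => [c]
  | a :: b :: t =>
    if a = '_' ∧ b = '_' then '_' :: skRep t else a :: skRep (b :: t)

theorem skRep_go_eq (fuel : Nat) (l acc : List Char) (h : l.length ≤ fuel) :
    PySem.Chars.replace.go ['_', '_'] ['_'] fuel l acc = acc.reverse ++ skRep l := by
  induction fuel generalizing l acc with
  | zero =>
    interval_cases hl : l.length
    · simp at hl; subst hl; simp [PySem.Chars.replace.go, skRep]
  | succ n ih =>
    match l with
    | [] => simp [PySem.Chars.replace.go, skRep]
    | [c] =>
      simp only [PySem.Chars.replace.go]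
      have : (['_', '_'] : List Char).isPrefixOf [c] = false := by
        simp [List.isPrefixOf]
      rw [this]
      simp only [Bool.false_eq_true, if_false]
      rw [ih [] (c :: acc) (by simp)]
      simp [skRep]
    | a :: b :: t =>
      simp only [PySem.Chars.replace.go]
      by_cases hab : a = '_' ∧ b = '_'
      · obtain ⟨ha, hb⟩ := hab; subst ha; subst hb
        have : (['_', '_'] : List Char).isPrefixOf ('_' :: '_' :: t) = true := by
          simp [List.isPrefixOf]
        rw [this]
        simp only [if_true, List.length_cons, List.drop_succ_cons, List.length_nil, List.drop_zero]
        rw [ih t (['_'].reverse ++ acc) (by simp at h ⊢; omega)]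
        simp [skRep]
      · have hpf : (['_', '_'] : List Char).isPrefixOf (a :: b :: t) = false := by
          simp only [List.isPrefixOf, Bool.and_eq_false_iff, beq_eq_false_iff_ne, ne_eq,
            Bool.and_true]
          by_cases ha : a = '_'
          · by_cases hb : b = '_'
            · exact absurd ⟨ha, hb⟩ hab
            · right; exact fun hb' => hb hb'.symm
          · left; exact fun ha' => ha ha'.symm
        rw [hpf]
        simp only [Bool.false_eq_true, if_false]
        rw [ih (b :: t) (a :: acc) (by simp at h ⊢; omega)]
        rw [skRep, if_neg hab]
        simp

theorem replace_eq_skRep (l : List Char) :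
    PySem.Chars.replace l ['_', '_'] ['_'] = skRep l := by
  unfold PySem.Chars.replace
  simp only [List.isEmpty_cons, Bool.false_eq_true, if_false]
  simpa using skRep_go_eq l.length l [] le_rfl

theorem length_skRep_le (l : List Char) : (skRep l).length ≤ l.length := by
  fun_induction skRep l with
  | case1 => simp
  | case2 c => simp
  | case3 a b t h ih => simp at ih ⊢; omega
  | case4 a b t h ih => simp at ih ⊢; omega

theorem length_skRep_lt (l : List Char) (h : ['_', '_'] <:+: l) :
    (skRep l).length < l.length := by
  fun_induction skRep l with
  | case1 => exact absurd (List.IsInfix.length_le h) (by simp)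
  | case2 c => exact absurd (List.IsInfix.length_le h) (by simp)
  | case3 a b t hab ih =>
    have := length_skRep_le t; simp; omega
  | case4 a b t hab ih =>
    have hbt : ['_', '_'] <:+: b :: t := by
      rcases (List.infix_cons_iff.mp h) with hpre | htail
      · exfalso
        rcases hpre with ⟨u, hu⟩
        simp at hu
        exact hab ⟨hu.1.symm, hu.2.1.symm⟩
      · exact htail
    have := ih hbt; simp at this ⊢; omega

-- the Python `while "__" in s2: s2 = s2.replace("__", "_")`
def skLoop (l : List Char) : List Char :=
  if h : PySem.Chars.isIn ['_', '_'] l = true then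
    skLoop (PySem.Chars.replace l ['_', '_'] ['_'])
  else l
termination_by l.length
decreasing_by
  rw [replace_eq_skRep]
  exact length_skRep_lt l ((PySem.Chars.isIn_iff_infix _ _).mp h)

def sanitize_key (s : String) : String :=
  let out := s.toList.foldl
    (fun acc ch => if PySem.Chars.isalnum ch then acc ++ [ch] else acc ++ ['_']) []
  -- `"".join(out)` on a list of single characters is `String.ofList out`
  let s2 := PySem.Chars.stripChars out ['_']
  String.ofList (skLoop s2)

-- ===== PORT B =====
def sanitize_key_alt (s : String) : String :=
  let r := s.toList.foldl
    (fun (st : List Char × Bool) ch =>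
      if PySem.Chars.isalnum ch then (st.1 ++ [ch], false)
      else if st.2 then st else (st.1 ++ ['_'], true))
    ([], true)
  String.ofList (PySem.Chars.stripChars r.1 ['_'])

-- ===== PRECONDITION & SPEC =====
def Spec_sanitize_key (s : String) (out : String) : Prop := out = sanitize_key_alt s
instance (s : String) (out : String) : Decidable (Spec_sanitize_key s out) := by unfold Spec_sanitize_key; infer_instance

-- ===== CLAIM (what is proved, stated in full; the proofs are below) =====
def Claim_equal_sanitize_key : Prop := ∀ (s : String), Dom_sanitize_key s → Spec_sanitize_key s (sanitize_key s)

-- ===== LEMMAS AND PROOFS =====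

-- full collapse of runs of '_' to a single '_'
def collapse : List Char → List Char
  | [] => []
  | [c] => [c]
  | a :: b :: t =>
    if a = '_' ∧ b = '_' then collapse (b :: t) else a :: collapse (b :: t)

-- the predicate `stripChars · ['_']` strips with
def usP (c : Char) : Bool := (['_'] : List Char).contains c

theorem usP_eq (c : Char) : usP c = decide (c = '_') := by simp [usP]

theorem usP_us : usP '_' = true := by decide

theorem usP_of_ne {c : Char} (h : c ≠ '_') : usP c = false := by
  rw [usP_eq]; simpa using h

theorem stripChars_eq (s : List Char) :
    PySem.Chars.stripChars s ['_'] = ((s.dropWhile usP).reverse.dropWhile usP).reverse := rfl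

theorem fchar_ne_us {c : Char} (h : PySem.Chars.isalnum c = true) : c ≠ '_' :=
  fun he => absurd (he ▸ h) (by decide)

theorem head_collapse (a : Char) (t : List Char) : (collapse (a :: t)).head? = some a := by
  induction t generalizing a with
  | nil => simp [collapse]
  | cons b w ih =>
    by_cases h : a = '_' ∧ b = '_'
    · rw [collapse.eq_3, if_pos h, ih b, h.1, h.2]
    · rw [collapse.eq_3, if_neg h]; simp

theorem collapse_ne_nil (a : Char) (t : List Char) : collapse (a :: t) ≠ [] := by
  intro h
  have := head_collapse a t
  rw [h] at this
  simp at this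

theorem collapse_cons_ne {a : Char} (h : a ≠ '_') (t : List Char) :
    collapse (a :: t) = a :: collapse t := by
  cases t with
  | nil => simp [collapse]
  | cons b w => rw [collapse.eq_3, if_neg (by tauto)]

theorem collapse_cons_us (t : List Char) :
    collapse ('_' :: t) = '_' :: collapse (t.dropWhile usP) := by
  induction t with
  | nil => simp [collapse]
  | cons b w ih =>
    by_cases hb : b = '_'
    · subst hb
      rw [collapse.eq_3, if_pos ⟨rfl, rfl⟩, ih, List.dropWhile_cons_of_pos usP_us]
    · rw [collapse.eq_3, if_neg (by tauto), List.dropWhile_cons_of_neg (by simp [usP_of_ne hb]),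
        collapse_cons_ne hb]

theorem dropWhile_collapse_aux :
    ∀ (n : Nat) (v : List Char), v.length ≤ n →
      (collapse v).dropWhile usP = collapse (v.dropWhile usP) := by
  intro n
  induction n with
  | zero =>
    intro v hv
    have : v = [] := by cases v <;> simp_all
    subst this; simp [collapse]
  | succ n ih =>
    intro v hv
    cases v with
    | nil => simp [collapse]
    | cons c w =>
      by_cases hc : c = '_'
      · subst hc
        rw [collapse_cons_us, List.dropWhile_cons_of_pos usP_us,
          ih (w.dropWhile usP) (le_trans (List.length_dropWhile_le _ _) (by simpa using hv)),
          List.dropWhile_idempotent, List.dropWhile_cons_of_pos usP_us]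
      · rw [collapse_cons_ne hc, List.dropWhile_cons_of_neg (by simp [usP_of_ne hc]),
          List.dropWhile_cons_of_neg (by simp [usP_of_ne hc]), collapse_cons_ne hc]

theorem dropWhile_collapse (v : List Char) :
    (collapse v).dropWhile usP = collapse (v.dropWhile usP) :=
  dropWhile_collapse_aux v.length v le_rfl

theorem collapse_cons_congr (c : Char) {x y : List Char} (h : collapse x = collapse y) :
    collapse (c :: x) = collapse (c :: y) := by
  by_cases hc : c = '_'
  · subst hc
    rw [collapse_cons_us, collapse_cons_us, ← dropWhile_collapse, ← dropWhile_collapse, h]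
  · rw [collapse_cons_ne hc, collapse_cons_ne hc, h]

theorem collapse_skRep (l : List Char) : collapse (skRep l) = collapse l := by
  fun_induction skRep l with
  | case1 => rfl
  | case2 c => rfl
  | case3 a b t hab ih =>
    obtain ⟨rfl, rfl⟩ := hab
    exact (collapse_cons_congr '_' ih).trans
      (show collapse ('_' :: '_' :: t) = collapse ('_' :: t) by
        rw [collapse.eq_3, if_pos ⟨rfl, rfl⟩]).symm
  | case4 a b t hab ih =>
    exact collapse_cons_congr a ih

theorem collapse_of_not_infix {l : List Char} (h : ¬ (['_', '_'] <:+: l)) : collapse l = l := by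
  fun_induction collapse l with
  | case1 => rfl
  | case2 c => rfl
  | case3 a b t hab ih =>
    exfalso
    obtain ⟨rfl, rfl⟩ := hab
    exact h ⟨[], t, by simp⟩
  | case4 a b t hab ih =>
    rw [ih (fun hi => h (List.infix_cons hi))]

theorem skLoop_eq_collapse_aux :
    ∀ (n : Nat) (l : List Char), l.length ≤ n → skLoop l = collapse l := by
  intro n
  induction n with
  | zero =>
    intro l hl
    have : l = [] := by cases l <;> simp_all
    subst this
    rw [skLoop]
    simp only [show PySem.Chars.isIn ['_', '_'] [] = false from by decide]
    rfl
  | succ n ih =>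
    intro l hl
    rw [skLoop]
    by_cases h : PySem.Chars.isIn ['_', '_'] l = true
    · rw [dif_pos h, replace_eq_skRep]
      have hlt := length_skRep_lt l ((PySem.Chars.isIn_iff_infix _ _).mp h)
      rw [ih (skRep l) (by omega), collapse_skRep]
    · rw [dif_neg h]
      exact (collapse_of_not_infix ((PySem.Chars.isIn_eq_false_iff _ _).mp
        (Bool.not_eq_true _ ▸ h))).symm

theorem skLoop_eq_collapse (l : List Char) : skLoop l = collapse l :=
  skLoop_eq_collapse_aux l.length l le_rfl

-- A's mapping pass
def fchar (c : Char) : Char := if PySem.Chars.isalnum c then c else '_'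

theorem foldA (l : List Char) (acc : List Char) :
    l.foldl (fun acc ch => if PySem.Chars.isalnum ch then acc ++ [ch] else acc ++ ['_']) acc
      = acc ++ l.map fchar := by
  induction l generalizing acc with
  | nil => simp
  | cons c t ih =>
    simp only [List.foldl_cons, List.map_cons, ih, fchar]
    by_cases hc : PySem.Chars.isalnum c = true <;> simp [hc]

-- B's single pass, with the accumulator abstracted away
def onepass : Bool → List Char → List Char
  | _, [] => []
  | prev, c :: t =>
    if PySem.Chars.isalnum c then c :: onepass false t
    else if prev then onepass true t else '_' :: onepass true t

theorem foldB (l : List Char) (acc : List Char) (prev : Bool) :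
    (l.foldl (fun (st : List Char × Bool) ch =>
        if PySem.Chars.isalnum ch then (st.1 ++ [ch], false)
        else if st.2 then st else (st.1 ++ ['_'], true)) (acc, prev)).1
      = acc ++ onepass prev l := by
  induction l generalizing acc prev with
  | nil => simp [onepass]
  | cons c t ih =>
    simp only [List.foldl_cons, onepass]
    by_cases hc : PySem.Chars.isalnum c = true
    · simp only [hc, if_true, ih]; simp
    · simp only [hc, Bool.false_eq_true, if_false]
      cases prev with
      | true => simpa using ih acc true
      | false => simp only [Bool.false_eq_true, if_false, ih]; simp

theorem onepass_eq (l : List Char) :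
    onepass true l = collapse ((l.map fchar).dropWhile usP)
      ∧ onepass false l = collapse (l.map fchar) := by
  induction l with
  | nil => exact ⟨rfl, rfl⟩
  | cons c t ih =>
    by_cases hc : PySem.Chars.isalnum c = true
    · have hne : c ≠ '_' := fchar_ne_us hc
      have hf : fchar c = c := if_pos hc
      constructor
      · rw [onepass, if_pos hc, List.map_cons, hf,
          List.dropWhile_cons_of_neg (by simp [usP_of_ne hne]), collapse_cons_ne hne, ih.2]
      · rw [onepass, if_pos hc, List.map_cons, hf, collapse_cons_ne hne, ih.2]
    · have hf : fchar c = '_' := if_neg hc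
      constructor
      · rw [onepass, if_neg hc, if_pos rfl, List.map_cons, hf,
          List.dropWhile_cons_of_pos usP_us, ih.1]
      · rw [onepass, if_neg hc, List.map_cons, hf, collapse_cons_us, ih.1]
        simp

theorem collapse_snoc_ne_aux :
    ∀ (n : Nat) (v : List Char), v.length ≤ n → ∀ (c : Char), c ≠ '_' →
      collapse (v ++ [c]) = collapse v ++ [c] := by
  intro n
  induction n with
  | zero =>
    intro v hv c hc
    have : v = [] := by cases v <;> simp_all
    subst this; rfl
  | succ n ih =>
    intro v hv c hc
    cases v with
    | nil => rfl
    | cons a w =>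
      by_cases ha : a = '_'
      · subst ha
        rw [List.cons_append, collapse_cons_us, collapse_cons_us, List.dropWhile_append]
        by_cases he : (w.dropWhile usP).isEmpty = true
        · rw [if_pos he, List.dropWhile_cons_of_neg (by simp [usP_of_ne hc])]
          rw [List.isEmpty_iff] at he
          rw [he]
          rfl
        · rw [if_neg he,
            ih (w.dropWhile usP) (le_trans (List.length_dropWhile_le _ _) (by simpa using hv)) c hc]
          rfl
      · rw [List.cons_append, collapse_cons_ne ha, collapse_cons_ne ha,
          ih w (by simpa using hv) c hc]
        rfl

theorem collapse_snoc_ne {c : Char} (hc : c ≠ '_') (v : List Char) :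
    collapse (v ++ [c]) = collapse v ++ [c] :=
  collapse_snoc_ne_aux v.length v le_rfl c hc

theorem collapse_snoc_us_aux :
    ∀ (n : Nat) (v : List Char), v.length ≤ n →
      collapse (v ++ ['_'])
        = if (collapse v).getLast? = some '_' then collapse v else collapse v ++ ['_'] := by
  intro n
  induction n with
  | zero =>
    intro v hv
    have : v = [] := by cases v <;> simp_all
    subst this; rfl
  | succ n ih =>
    intro v hv
    cases v with
    | nil => rfl
    | cons a w =>
      by_cases ha : a = '_'
      · subst ha
        rw [List.cons_append, collapse_cons_us, collapse_cons_us, List.dropWhile_append]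
        by_cases he : (w.dropWhile usP).isEmpty = true
        · rw [if_pos he, List.isEmpty_iff.mp he, List.dropWhile_cons_of_pos usP_us]
          simp [collapse]
        · rw [if_neg he, ih (w.dropWhile usP)
            (le_trans (List.length_dropWhile_le _ _) (by simpa using hv))]
          have hne : w.dropWhile usP ≠ [] := fun hnil => he (by rw [hnil]; rfl)
          obtain ⟨d, w', hw⟩ := List.exists_cons_of_ne_nil hne
          rw [hw]
          obtain ⟨e, x', hx⟩ := List.exists_cons_of_ne_nil (collapse_ne_nil d w')
          rw [hx, List.getLast?_cons_cons]
          split_ifs <;> rfl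
      · rw [List.cons_append, collapse_cons_ne ha, collapse_cons_ne ha]
        rw [ih w (by simpa using hv)]
        by_cases hw : collapse w = []
        · have : w = [] := by
            cases w with
            | nil => rfl
            | cons b w' => exact absurd hw (collapse_ne_nil b w')
          subst this
          simp [collapse, List.getLast?_singleton, ha]
        · obtain ⟨e, x', hx⟩ := List.exists_cons_of_ne_nil hw
          rw [hx, List.getLast?_cons_cons]
          split_ifs <;> rfl

theorem collapse_snoc_us (v : List Char) :
    collapse (v ++ ['_'])
      = if (collapse v).getLast? = some '_' then collapse v else collapse v ++ ['_'] :=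
  collapse_snoc_us_aux v.length v le_rfl

theorem collapse_reverse (v : List Char) : collapse v.reverse = (collapse v).reverse := by
  induction v with
  | nil => rfl
  | cons c w ih =>
    rw [List.reverse_cons]
    by_cases hc : c = '_'
    · subst hc
      rw [collapse_snoc_us, ih, List.getLast?_reverse, collapse_cons_us, List.reverse_cons,
        ← dropWhile_collapse]
      cases w with
      | nil => simp [collapse]
      | cons d w' =>
        rw [head_collapse]
        by_cases hd : d = '_'
        · subst hd
          rw [if_pos rfl, collapse_cons_us, ← dropWhile_collapse,
            List.dropWhile_cons_of_pos usP_us, List.dropWhile_idempotent, List.reverse_cons]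
        · rw [if_neg (by simpa using hd), collapse_cons_ne hd,
            List.dropWhile_cons_of_neg (by simp [usP_of_ne hd])]
    · rw [collapse_snoc_ne hc, ih, collapse_cons_ne hc, List.reverse_cons]

theorem strip_collapse (u : List Char) :
    ((collapse u).reverse.dropWhile usP).reverse = collapse ((u.reverse.dropWhile usP).reverse) := by
  rw [collapse_reverse, ← dropWhile_collapse, collapse_reverse]

theorem sanitize_key_spec : Claim_equal_sanitize_key := by
  intro s _
  unfold Spec_sanitize_key sanitize_key sanitize_key_alt
  simp only [foldA, foldB, List.nil_append, stripChars_eq, skLoop_eq_collapse,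
    (onepass_eq s.toList).1]
  rw [dropWhile_collapse, List.dropWhile_idempotent, strip_collapse]
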